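-- pv_equiv track=rewrite | github.com/ForestasYan/Projet-Data-Science | Recuperation_classement.py | affichage_comparaison
-- ===== SOURCE A (Python) =====
-- def affichage_comparaison(txt):
--     nv_txt = ""
--     bon = True
--     for cara in txt:
--         if cara == ",":
--             pass
--         elif cara == "p":
--             pass
--         elif cara == "(":
--             bon = False
--         elif bon == True:
--             nv_txt += cara
--     return nv_txt
-- ===== SOURCE B (Python) =====
-- def affichage_comparaison(txt):
--     # phase 1: locate the first '(' and cut the string there
--     i = txt.find('(')
--     prefix = txt if i == -1 else txt[:i]
--     # phase 2: drop the skipped characters from that prefix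
--     return ''.join(c for c in prefix if c != ',' and c != 'p')
-- ===== Notes on version B (the rewrite author's own statement) =====
-- stated objective: simpler
-- what changed: Replaces A's single flag-driven per-character pass with a two-phase pipeline: first cut the string at the first '(' via str.find and a slice, then filter ',' and 'p' out of that prefix.
import Mathlib
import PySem

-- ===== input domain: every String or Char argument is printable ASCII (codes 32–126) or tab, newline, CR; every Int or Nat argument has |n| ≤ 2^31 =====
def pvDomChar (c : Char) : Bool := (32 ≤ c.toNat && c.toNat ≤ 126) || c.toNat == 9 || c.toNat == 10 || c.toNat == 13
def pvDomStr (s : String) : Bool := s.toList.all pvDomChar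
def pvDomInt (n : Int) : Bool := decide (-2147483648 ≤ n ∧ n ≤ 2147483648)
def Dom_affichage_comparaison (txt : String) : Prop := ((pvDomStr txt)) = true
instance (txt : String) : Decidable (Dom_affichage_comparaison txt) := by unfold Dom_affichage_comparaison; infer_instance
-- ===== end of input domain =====

-- B replaces A's single flag-driven pass with a two-phase pipeline (cut at the first '(' ; then filter); objective: simpler.

-- ===== PORT A =====
-- literal transliteration of A's for-loop over the characters with the (nv_txt, bon) state
def affichage_comparaison (txt : String) : String :=
  (txt.toList.foldl (fun (st : String × Bool) cara =>
      if cara == ',' then st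
      else if cara == 'p' then st
      else if cara == '(' then (st.1, false)
      else if st.2 == true then (st.1.push cara, st.2)
      else st) ("", true)).1

-- ===== PORT B =====
-- phase 1: txt.find('(') and the slice txt[:i]; phase 2: ''.join(genexp) = filter on the characters
def affichage_comparaison_alt (txt : String) : String :=
  let cs := txt.toList
  let i := PySem.Chars.find cs ['(']
  let pre := if i == -1 then cs else PySem.Chars.slice cs none (some i)
  String.ofList (pre.filter (fun c => !(c == ',') && !(c == 'p')))

-- ===== PRECONDITION & SPEC =====
def Spec_affichage_comparaison (txt : String) (out : String) : Prop := out = affichage_comparaison_alt txt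
instance (txt : String) (out : String) : Decidable (Spec_affichage_comparaison txt out) := by unfold Spec_affichage_comparaison; infer_instance

-- ===== CLAIM (what is proved, stated in full; the proofs are below) =====
def Claim_equal_affichage_comparaison : Prop := ∀ (txt : String), Dom_affichage_comparaison txt → Spec_affichage_comparaison txt (affichage_comparaison txt)

-- ===== LEMMAS AND PROOFS =====

-- A's loop step
def pvStepA (st : String × Bool) (cara : Char) : String × Bool :=
  if cara == ',' then st
  else if cara == 'p' then st
  else if cara == '(' then (st.1, false)
  else if st.2 == true then (st.1.push cara, st.2)
  else st

lemma pvFoldA_false (cs : List Char) (acc : String) :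
    cs.foldl pvStepA (acc, false) = (acc, false) := by
  induction cs with
  | nil => rfl
  | cons c cs ih =>
    simp only [List.foldl_cons, pvStepA]
    by_cases h1 : c = ',' <;> by_cases h2 : c = 'p' <;> by_cases h3 : c = '(' <;>
      simp [h1, h2, h3, ih]

lemma pvPush_eq (s : String) (c : Char) : s.push c = s ++ String.ofList [c] := by
  rw [String.push_eq_append]; rfl

lemma pvFoldA_true (cs : List Char) (acc : String) :
    (cs.foldl pvStepA (acc, true)).1 =
      acc ++ String.ofList ((cs.takeWhile (fun c => !(c == '('))).filter
        (fun c => !(c == ',') && !(c == 'p'))) := by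
  induction cs generalizing acc with
  | nil => simp
  | cons c cs ih =>
    simp only [List.foldl_cons, pvStepA]
    by_cases h3 : c = '(' 
    · simp [h3, pvFoldA_false]
    · by_cases h1 : c = ','
      · simp [h1, ih]
      · by_cases h2 : c = 'p'
        · simp [h2, h3, ih]
        · simp only [h1, h2, h3, beq_iff_eq, if_false, if_true, beq_self_eq_true]
          rw [ih, List.takeWhile_cons, if_pos (by simp [h3]), List.filter_cons,
            if_pos (by simp [h1, h2]), pvPush_eq, String.append_assoc,
            ← String.ofList_append]
          rfl

-- the loop of port A is the foldl of pvStepA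
lemma pvPortA_eq (txt : String) :
    affichage_comparaison txt =
      String.ofList ((txt.toList.takeWhile (fun c => !(c == '('))).filter
        (fun c => !(c == ',') && !(c == 'p'))) := by
  unfold affichage_comparaison
  have : (fun (st : String × Bool) cara =>
      if cara == ',' then st
      else if cara == 'p' then st
      else if cara == '(' then (st.1, false)
      else if st.2 == true then (st.1.push cara, st.2)
      else st) = pvStepA := rfl
  rw [this, pvFoldA_true]
  simp

lemma pvSingleton_infix_of_mem {a : Char} {l : List Char} (h : a ∈ l) : [a] <:+: l := by
  obtain ⟨s, t, rfl⟩ := List.append_of_mem h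
  exact ⟨s, t, by simp⟩

lemma pvSingleton_prefix_drop {a : Char} {l : List Char} {i : ℕ} :
    [a] <+: l.drop i ↔ l[i]? = some a := by
  constructor
  · rintro ⟨t, ht⟩
    have h0 : (l.drop i)[0]? = some a := by rw [← ht]; simp
    simpa [List.getElem?_drop] using h0
  · intro h
    have hi : i < l.length := by
      by_contra hlt
      rw [List.getElem?_eq_none (Nat.le_of_not_lt hlt)] at h
      simp at h
    have ha : l[i] = a := by
      have := List.getElem?_eq_getElem hi
      rw [this] at h
      exact Option.some.inj h
    refine ⟨l.drop (i+1), ?_⟩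
    rw [List.drop_eq_getElem_cons hi, ha]
    rfl

lemma pvTakeWhile_eq_take {l : List Char} {n : ℕ}
    (hn : l[n]? = some '(') (hbefore : ∀ i, i < n → l[i]? ≠ some '(') :
    l.takeWhile (fun c => !(c == '(')) = l.take n := by
  induction l generalizing n with
  | nil => simp at hn
  | cons c cs ih =>
    cases n with
    | zero =>
      simp at hn
      simp [List.takeWhile_cons, hn]
    | succ m =>
      have hc : c ≠ '(' := by
        have := hbefore 0 (by omega)
        simpa using this
      simp only [List.takeWhile_cons, List.take_succ_cons]
      simp only [hc, bne_iff_ne, ne_eq, not_false_eq_true, beq_iff_eq, if_true,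
        Bool.not_eq_true']
      rw [ih (by simpa using hn) (fun i hi => by
        have := hbefore (i+1) (by omega); simpa using this)]
      simp [hc]

lemma pvPortB_eq (txt : String) :
    affichage_comparaison_alt txt =
      String.ofList ((txt.toList.takeWhile (fun c => !(c == '('))).filter
        (fun c => !(c == ',') && !(c == 'p'))) := by
  unfold affichage_comparaison_alt
  set cs := txt.toList with hcs
  by_cases h : PySem.Chars.find cs ['('] = -1
  · -- '(' does not occur: the prefix is the whole string
    have hnot : ¬ ['('] <:+: cs := (PySem.Chars.find_eq_neg_one_iff cs ['(']).mp h
    have hmem : '(' ∉ cs := fun hm => hnot (pvSingleton_infix_of_mem hm)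
    have : cs.takeWhile (fun c => !(c == '(')) = cs := by
      apply List.takeWhile_eq_self_iff.mpr
      intro c hc
      simp only [Bool.not_eq_eq_eq_not, Bool.not_true, beq_eq_false_iff_ne, ne_eq]
      exact fun hce => hmem (hce ▸ hc)
    simp [h, this]
  · -- '(' occurs at index (find cs ['(']).toNat
    have hnn : 0 ≤ PySem.Chars.find cs ['('] := by
      rcases lt_or_ge (PySem.Chars.find cs ['(']) 0 with hlt | hge
      · exfalso; apply h
        have := PySem.Chars.neg_one_le_find cs ['(']
        omega
      · exact hge
    have hspec := PySem.Chars.findFrom_natCast_spec cs ['('] 0 (Nat.zero_le _)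
      (by rw [Nat.cast_zero, PySem.Chars.findFrom_zero]; exact h)
    rw [Nat.cast_zero, PySem.Chars.findFrom_zero] at hspec
    obtain ⟨-, hpre, hmin⟩ := hspec
    have hat : cs[(PySem.Chars.find cs ['(']).toNat]? = some '(' :=
      pvSingleton_prefix_drop.mp hpre
    have hbef : ∀ i, i < (PySem.Chars.find cs ['(']).toNat → cs[i]? ≠ some '(' := by
      intro i hi hsome
      exact hmin i (Nat.zero_le _) hi (pvSingleton_prefix_drop.mpr hsome)
    rw [pvTakeWhile_eq_take hat hbef]
    simp only [h, beq_iff_eq, if_false]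
    rw [PySem.Chars.slice_eq_listSlice, PySem.List.slice_to cs hnn]

-- ===== VERDICT (by name: the statement is the Claim_ definition above) =====
theorem affichage_comparaison_spec : Claim_equal_affichage_comparaison := by
  intro txt _
  unfold Spec_affichage_comparaison
  exact (pvPortA_eq txt).trans (pvPortB_eq txt).symm
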